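-- pv_equiv track=rewrite | github.com/jaykobdetar/jaykobdetar.github.io | tests/test_existing_content.py | parse_content_file
-- ===== SOURCE A (Python) =====
-- def parse_content_file(content):
--     """Parse content file format"""
--     lines = content.strip().split('\n')
--     metadata = {}
--     content_start = None
--
--     for i, line in enumerate(lines):
--         if line.strip() == '---':
--             content_start = i + 1
--             break
--         if ':' in line and not line.startswith('#'):
--             key, value = line.split(':', 1)
--             metadata[key.strip()] = value.strip()
--
--     main_content = '\n'.join(lines[content_start:]) if content_start else ""
--     return metadata, main_content
-- ===== SOURCE B (Python) =====
-- def parse_content_file(content):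
--     """Parse content file format"""
--     def go(lines):
--         # returns (metadata dict, body lines or None) for the given suffix of lines
--         if not lines:
--             return {}, None
--         head, rest = lines[0], lines[1:]
--         if head.strip() == '---':
--             return {}, rest
--         metadata, body = go(rest)
--         if ':' in head and not head.startswith('#'):
--             key, value = head.split(':', 1)
--             metadata = {key.strip(): value.strip(), **metadata}
--         return metadata, body
--
--     metadata, body = go(content.strip().split('\n'))
--     return metadata, '\n'.join(body) if body is not None else ''
-- ===== Notes on version B (the rewrite author's own statement) =====
-- stated objective: alternative
-- what changed: B replaces A's indexed loop-with-break by a recursion over the lines that returns the body suffix directly and builds the metadata dict back-to-front, merging each line's pair in front of the already-parsed tail via {k: v, **metadata} (first-occurrence position, last-occurrence value), instead of A's forward dict insertion with a leftover loop index.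
import Mathlib
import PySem

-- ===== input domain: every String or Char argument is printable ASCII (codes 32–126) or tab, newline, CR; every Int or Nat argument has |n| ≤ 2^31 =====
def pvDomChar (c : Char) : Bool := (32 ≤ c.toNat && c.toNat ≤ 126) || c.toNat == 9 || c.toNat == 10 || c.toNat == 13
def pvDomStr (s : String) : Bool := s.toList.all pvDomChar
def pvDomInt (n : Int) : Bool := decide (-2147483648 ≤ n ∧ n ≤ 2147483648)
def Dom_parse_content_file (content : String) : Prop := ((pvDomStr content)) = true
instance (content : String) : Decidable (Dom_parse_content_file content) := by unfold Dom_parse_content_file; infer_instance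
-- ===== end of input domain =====

-- B replaces A's indexed loop-with-break by a recursion over the lines that returns the body
-- suffix directly and builds the metadata dict back-to-front via {k: v, **md} merging
-- (objective: alternative decomposition, same cost).

-- ===== PORT A =====
-- the 'for i, line in enumerate(lines)' loop with its break: recursion over the lines
-- carrying the index i and the metadata dict; returns (metadata, content_start)
def pcfLoopA (ls : List String) (i : Int) (md : PySem.Dict String String) :
    PySem.Dict String String × Option Int :=
  match ls with
  | [] => (md, none)
  | l :: rest =>
    if PySem.Str.strip l == "---" then (md, some (i + 1))
    else if PySem.Str.isIn ":" l && !(PySem.Str.startswith l "#") then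
      match PySem.Str.splitMax? l ":" 1 with
      | some (key :: value :: _) =>
          pcfLoopA rest (i + 1) (md.insert (PySem.Str.strip key) (PySem.Str.strip value))
      | _ => pcfLoopA rest (i + 1) md  -- unreachable: ':' in l gives exactly two parts
    else pcfLoopA rest (i + 1) md

def parse_content_file (content : String) : (List (String × String)) × String :=
  let lines := (PySem.Str.split? (PySem.Str.strip content) "\n").getD []
  let r := pcfLoopA lines 0 PySem.Dict.empty
  -- 'x if content_start else ""' : Optional[int] is falsy when None or 0
  let main_content :=
    match r.2 with
    | some cs => if cs = 0 then "" else PySem.Str.join "\n" (PySem.List.slice lines (some cs) none)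
    | none => ""
  (r.1.items, main_content)

-- ===== PORT B =====
-- literal port of Source B's '{key.strip(): value.strip(), **metadata}':
-- a fresh dict seeded with (k, v), then metadata's items re-inserted in order
def pcfDictCons (k v : String) (md : PySem.Dict String String) : PySem.Dict String String :=
  md.items.foldl (fun d p => d.insert p.1 p.2)
    ((PySem.Dict.empty : PySem.Dict String String).insert k v)

-- the inner recursive 'go(lines)' of Source B
def pcfGoB : List String → PySem.Dict String String × Option (List String)
  | [] => (PySem.Dict.empty, none)
  | head :: rest =>
    if PySem.Str.strip head == "---" then (PySem.Dict.empty, some rest)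
    else
      let r := pcfGoB rest
      let md :=
        if PySem.Str.isIn ":" head && !(PySem.Str.startswith head "#") then
          match PySem.Str.splitMax? head ":" 1 with
          | some (key :: value :: _) =>
              pcfDictCons (PySem.Str.strip key) (PySem.Str.strip value) r.1
          | _ => r.1
        else r.1
      (md, r.2)

def parse_content_file_alt (content : String) : (List (String × String)) × String :=
  let r := pcfGoB ((PySem.Str.split? (PySem.Str.strip content) "\n").getD [])
  (r.1.items,
   match r.2 with
   | some body => PySem.Str.join "\n" body
   | none => "")

-- ===== PRECONDITION & SPEC =====
def Spec_parse_content_file (content : String) (out : (List (String × String)) × String) : Prop := out = parse_content_file_alt content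
instance (content : String) (out : (List (String × String)) × String) : Decidable (Spec_parse_content_file content out) := by unfold Spec_parse_content_file; infer_instance

-- ===== CLAIM (what is proved, stated in full; the proofs are below) =====
def Claim_equal_parse_content_file : Prop := ∀ (content : String), Dom_parse_content_file content → Spec_parse_content_file content (parse_content_file content)

-- ===== LEMMAS AND PROOFS =====

-- proof-side normal form: the (key, value) a header line contributes, if any
def pcfKV (l : String) : Option (String × String) :=
  if PySem.Str.isIn ":" l && !(PySem.Str.startswith l "#") then
    match PySem.Str.splitMax? l ":" 1 with
    | some (key :: value :: _) => some (PySem.Str.strip key, PySem.Str.strip value)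
    | _ => none
  else none

-- one header line applied to an accumulating dict (A's loop body, B's merge step)
def pcfHeaderStep (md : PySem.Dict String String) (l : String) : PySem.Dict String String :=
  match pcfKV l with
  | some (k, v) => md.insert k v
  | none => md

theorem pcfLoopA_eq (ls : List String) (i : Int) (md : PySem.Dict String String) :
    pcfLoopA ls i md =
      match ls.findIdx? (fun l => PySem.Str.strip l == "---") with
      | none => (ls.foldl pcfHeaderStep md, none)
      | some j => ((ls.take j).foldl pcfHeaderStep md, some (i + j + 1)) := by
  induction ls generalizing i md with
  | nil => simp [pcfLoopA]
  | cons l rest ih =>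
    by_cases hd : (PySem.Str.strip l == "---") = true
    · simp [pcfLoopA, hd, List.findIdx?_cons]
    · have hA : pcfLoopA (l :: rest) i md = pcfLoopA rest (i + 1) (pcfHeaderStep md l) := by
        unfold pcfHeaderStep pcfKV
        simp only [pcfLoopA, hd, Bool.false_eq_true, if_false]
        split
        · cases PySem.Str.splitMax? l ":" 1 with
          | none => rfl
          | some parts =>
            cases parts with
            | nil => rfl
            | cons a t => cases t <;> rfl
        · rfl
      rw [hA, ih]
      cases hfind : rest.findIdx? (fun l => PySem.Str.strip l == "---") with
      | none => simp [List.findIdx?_cons, hd, hfind]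
      | some j =>
        simp only [List.findIdx?_cons, hd, Bool.false_eq_true, if_false, hfind, Option.map_some,
          List.take_succ_cons, List.foldl_cons]
        simp only [Prod.mk.injEq, Option.some.injEq]
        exact ⟨trivial, by push_cast; ring⟩

-- B's md-update expression is pcfHeaderStep-shaped merging
theorem pcfGoB_cons (head : String) (rest : List String)
    (hd : ¬ (PySem.Str.strip head == "---") = true) :
    pcfGoB (head :: rest) =
      ((match pcfKV head with
        | some (k, v) => pcfDictCons k v (pcfGoB rest).1
        | none => (pcfGoB rest).1), (pcfGoB rest).2) := by
  unfold pcfKV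
  simp only [pcfGoB, hd, Bool.false_eq_true, if_false]
  split
  · cases PySem.Str.splitMax? head ":" 1 with
    | none => rfl
    | some parts =>
      cases parts with
      | nil => rfl
      | cons a t => cases t <;> rfl
  · rfl

-- two inserts at distinct keys commute when the first key is already present
theorem dict_insert_comm_of_contains (d : PySem.Dict String String) (k q1 v q2 : String)
    (hc : d.contains k = true) (hne : q1 ≠ k) :
    (d.insert k v).insert q1 q2 = (d.insert q1 q2).insert k v := by
  apply PySem.Dict.ext
  by_cases hq : d.contains q1 = true
  · rw [PySem.Dict.items_insert_of_contains (d.insert k v) q2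
        (by simp [PySem.Dict.contains_insert, hq]),
      PySem.Dict.items_insert_of_contains d v hc,
      PySem.Dict.items_insert_of_contains (d.insert q1 q2) v
        (by simp [PySem.Dict.contains_insert, hc]),
      PySem.Dict.items_insert_of_contains d q2 hq]
    simp only [List.map_map]
    apply List.map_congr_left
    intro p _
    by_cases h1 : p.1 = k <;> by_cases h2 : p.1 = q1 <;>
      simp_all [Function.comp]
  · rw [PySem.Dict.items_insert_of_not_contains (d.insert k v) q2
        (by simp [PySem.Dict.contains_insert, hq, fun h : q1 = k => hne h]),
      PySem.Dict.items_insert_of_contains d v hc,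
      PySem.Dict.items_insert_of_contains (d.insert q1 q2) v
        (by simp [PySem.Dict.contains_insert, hc]),
      PySem.Dict.items_insert_of_not_contains d q2 (by simpa using hq)]
    simp [List.map_append, fun h : q1 = k => hne h]

-- re-inserting items with keys ≠ k leaves a contained key's entry untouched
theorem replay_insert_of_not_mem (t : List (String × String)) (d : PySem.Dict String String)
    (k v : String) (hc : d.contains k = true) (hk : k ∉ t.map Prod.fst) :
    t.foldl (fun d p => d.insert p.1 p.2) (d.insert k v)
      = (t.foldl (fun d p => d.insert p.1 p.2) d).insert k v := by
  induction t generalizing d with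
  | nil => rfl
  | cons p t ih =>
    simp only [List.map_cons, List.mem_cons, not_or] at hk
    simp only [List.foldl_cons]
    rw [dict_insert_comm_of_contains d k p.1 v p.2 hc (Ne.symm hk.1)]
    exact ih (d.insert p.1 p.2) (by simp [PySem.Dict.contains_insert, hc]) hk.2

-- replaying items with the entry at k updated = replaying then inserting (k, v)
theorem replay_map_update (l : List (String × String)) (d0 : PySem.Dict String String)
    (k v : String) (hnd : (l.map Prod.fst).Nodup) (hk : k ∈ l.map Prod.fst) :
    (l.map (fun p => if p.1 == k then (k, v) else p)).foldl (fun d p => d.insert p.1 p.2) d0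
      = (l.foldl (fun d p => d.insert p.1 p.2) d0).insert k v := by
  induction l generalizing d0 with
  | nil => simp at hk
  | cons p t ih =>
    simp only [List.map_cons, List.nodup_cons] at hnd
    by_cases hp : p.1 = k
    · have htid : t.map (fun p => if (p.1 == k) = true then (k, v) else p) = t := by
        have h1 : t.map (fun p => if (p.1 == k) = true then (k, v) else p) = t.map id := by
          apply List.map_congr_left
          intro q hq
          have hq1 : q.1 ≠ k := fun h => hnd.1 (hp ▸ h ▸ List.mem_map_of_mem hq)
          simp [hq1]
        rw [h1, List.map_id]
      simp only [List.map_cons, List.foldl_cons, hp, beq_self_eq_true, if_true]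
      rw [htid, ← replay_insert_of_not_mem t (d0.insert k p.2) k v
          (by simp [PySem.Dict.contains_insert_self]) (hp ▸ hnd.1),
        PySem.Dict.insert_insert_self]
    · have hkt : k ∈ t.map Prod.fst := by
        rcases List.mem_cons.mp hk with h | h
        · exact absurd h.symm hp
        · exact h
      simp only [List.map_cons, List.foldl_cons]
      rw [if_neg (by simp [hp])]
      exact ih (d0.insert p.1 p.2) hnd.2 hkt

-- merging (d.insert k v) into d0 = merging d then inserting (k, v)
theorem merge_insert (d0 d : PySem.Dict String String) (k v : String) (hnd : d.keys.Nodup) :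
    (d.insert k v).items.foldl (fun d p => d.insert p.1 p.2) d0
      = (d.items.foldl (fun d p => d.insert p.1 p.2) d0).insert k v := by
  by_cases hc : d.contains k = true
  · rw [PySem.Dict.items_insert_of_contains d v hc]
    exact replay_map_update d.items d0 k v hnd
      ((PySem.Dict.contains_iff_mem_keys d k).mp hc)
  · rw [PySem.Dict.items_insert_of_not_contains d v (by simpa using hc), List.foldl_append]
    rfl

theorem nodup_keys_headerStep (d : PySem.Dict String String) (l : String)
    (h : d.keys.Nodup) : (pcfHeaderStep d l).keys.Nodup := by
  unfold pcfHeaderStep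
  cases pcfKV l with
  | none => exact h
  | some kv => exact PySem.Dict.nodup_keys_insert _ _ _ h

-- merging a header-fold into d0 = folding the header starting from the merge
theorem merge_foldl (hl : List String) (d0 : PySem.Dict String String) :
    ∀ d : PySem.Dict String String, d.keys.Nodup →
      (hl.foldl pcfHeaderStep d).items.foldl (fun d p => d.insert p.1 p.2) d0
        = hl.foldl pcfHeaderStep (d.items.foldl (fun d p => d.insert p.1 p.2) d0) := by
  induction hl with
  | nil => intro d _; rfl
  | cons l t ih =>
    intro d hnd
    simp only [List.foldl_cons]
    rw [ih (pcfHeaderStep d l) (nodup_keys_headerStep d l hnd)]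
    congr 1
    unfold pcfHeaderStep
    cases pcfKV l with
    | none => rfl
    | some kv => exact merge_insert d0 d kv.1 kv.2 hnd

-- {k: v, **(fold of header from empty)} = fold of header from {k: v}
theorem pcfDictCons_foldl (k v : String) (hl : List String) :
    pcfDictCons k v (hl.foldl pcfHeaderStep PySem.Dict.empty)
      = hl.foldl pcfHeaderStep ((PySem.Dict.empty : PySem.Dict String String).insert k v) := by
  unfold pcfDictCons
  rw [merge_foldl hl _ PySem.Dict.empty PySem.Dict.nodup_keys_empty]
  rfl

-- B's recursion in the same normal form as A's loop
theorem pcfGoB_eq (ls : List String) :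
    pcfGoB ls =
      match ls.findIdx? (fun l => PySem.Str.strip l == "---") with
      | none => (ls.foldl pcfHeaderStep PySem.Dict.empty, none)
      | some j => ((ls.take j).foldl pcfHeaderStep PySem.Dict.empty, some (ls.drop (j + 1))) := by
  induction ls with
  | nil => simp [pcfGoB]
  | cons l rest ih =>
    by_cases hd : (PySem.Str.strip l == "---") = true
    · simp [pcfGoB, hd, List.findIdx?_cons]
    · rw [pcfGoB_cons l rest hd, ih]
      cases hfind : rest.findIdx? (fun l => PySem.Str.strip l == "---") with
      | none =>
        simp only [List.findIdx?_cons, hd, Bool.false_eq_true, if_false, hfind, List.foldl_cons]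
        cases hkv : pcfKV l with
        | none =>
          rw [show pcfHeaderStep PySem.Dict.empty l = PySem.Dict.empty from by
            simp [pcfHeaderStep, hkv]]
          simp
        | some kv =>
          rw [show pcfHeaderStep PySem.Dict.empty l
              = (PySem.Dict.empty : PySem.Dict String String).insert kv.1 kv.2 from by
            simp [pcfHeaderStep, hkv]]
          exact congrArg (fun m => (m, (none : Option (List String))))
            (pcfDictCons_foldl kv.1 kv.2 rest)
      | some j =>
        simp only [List.findIdx?_cons, hd, Bool.false_eq_true, if_false, hfind, Option.map_some,
          List.take_succ_cons, List.foldl_cons, List.drop_succ_cons]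
        cases hkv : pcfKV l with
        | none =>
          rw [show pcfHeaderStep PySem.Dict.empty l = PySem.Dict.empty from by
            simp [pcfHeaderStep, hkv]]
        | some kv =>
          rw [show pcfHeaderStep PySem.Dict.empty l
              = (PySem.Dict.empty : PySem.Dict String String).insert kv.1 kv.2 from by
            simp [pcfHeaderStep, hkv]]
          exact congrArg (fun m => (m, some (rest.drop (j + 1))))
            (pcfDictCons_foldl kv.1 kv.2 (rest.take j))

-- ===== VERDICT (by name: the statement is the Claim_ definition above) =====
theorem parse_content_file_spec : Claim_equal_parse_content_file := by
  intro content _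
  unfold Spec_parse_content_file parse_content_file parse_content_file_alt
  simp only [pcfLoopA_eq, pcfGoB_eq]
  cases hfind : ((PySem.Str.split? (PySem.Str.strip content) "\n").getD []).findIdx?
      (fun l => PySem.Str.strip l == "---") with
  | none => simp
  | some j =>
    dsimp only
    have h0 : ¬ ((0 : Int) + (j : Int) + 1 = 0) := by omega
    rw [if_neg h0,
      PySem.List.slice_from ((PySem.Str.split? (PySem.Str.strip content) "\n").getD [])
        (show (0 : Int) ≤ 0 + (j : Int) + 1 by omega)]
    have ht : ((0 : Int) + (j : Int) + 1).toNat = j + 1 := by omega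
    rw [ht]
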